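-- pv_equiv track=rewrite | github.com/fizbin/adventofcode | aoc18.py | find_nested4
-- ===== SOURCE A (Python) =====
-- def find_nested4(snum):
--     # returns number of chars, or None
--     count = 0
--     for (idx, char) in enumerate(snum):
--         if char == '[':
--             if count == 4:
--                 return idx
--             count += 1
--         if char == ']':
--             count -= 1
--     return None
-- ===== SOURCE B (Python) =====
-- def find_nested4(snum):
--     # two-pass: precompute depth-before-each-char table, then look up first '[' at depth 4
--     depths = [0]
--     for ch in snum:
--         depths.append(depths[-1] + (1 if ch == '[' else -1 if ch == ']' else 0))
--     return next((idx for idx, ch in enumerate(snum)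
--                  if ch == '[' and depths[idx] == 4), None)
-- ===== Notes on version B (the rewrite author's own statement) =====
-- stated objective: alternative
-- what changed: Replaces the single early-exit scan carrying a mutable depth counter with a two-pass decomposition: first build a table of running depths (the depth before each character), then return the index of the first opening bracket whose preceding depth equals 4.
import Mathlib
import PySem

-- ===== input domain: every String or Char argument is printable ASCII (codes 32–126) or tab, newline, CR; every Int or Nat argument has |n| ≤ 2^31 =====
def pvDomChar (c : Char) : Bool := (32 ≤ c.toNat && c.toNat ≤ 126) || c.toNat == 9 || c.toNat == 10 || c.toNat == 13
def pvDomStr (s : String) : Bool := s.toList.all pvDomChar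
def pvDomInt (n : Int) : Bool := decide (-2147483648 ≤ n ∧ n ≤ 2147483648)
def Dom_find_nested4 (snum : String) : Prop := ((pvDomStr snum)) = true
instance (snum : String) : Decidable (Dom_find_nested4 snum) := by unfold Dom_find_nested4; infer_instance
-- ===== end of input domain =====

-- ===== PORT A =====
-- A: single scan with a mutable depth counter and early return.
def find_nested4_loop : List (Int × Char) → Int → Option Int
  | [], _ => none
  | (idx, char) :: rest, count =>
    if char = '[' ∧ count = 4 then some idx
    else
      let count1 := if char = '[' then count + 1 else count
      let count2 := if char = ']' then count1 - 1 else count1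
      find_nested4_loop rest count2

def find_nested4 (snum : String) : Option Int :=
  find_nested4_loop (PySem.List.enumerate snum.toList) 0

-- ===== PORT B =====
-- B: first pass builds the list of running depths (depths[i] = depth before char i),
-- second pass returns the first '[' whose depth-before equals 4.
def find_nested4_delta (ch : Char) : Int :=
  if ch = '[' then 1 else if ch = ']' then -1 else 0

def find_nested4_depths (cs : List Char) : List Int :=
  cs.foldl (fun ds ch => ds ++ [ds.getLast! + find_nested4_delta ch]) [0]

def find_nested4_search (depths : List Int) : List (Int × Char) → Option Int
  | [] => none
  | (idx, ch) :: rest =>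
    if ch = '[' ∧ depths.getD idx.toNat 0 = 4 then some idx
    else find_nested4_search depths rest

def find_nested4_alt (snum : String) : Option Int :=
  let depths := find_nested4_depths snum.toList
  find_nested4_search depths (PySem.List.enumerate snum.toList)

-- ===== PRECONDITION & SPEC =====
def Spec_find_nested4 (snum : String) (out : Option Int) : Prop := out = find_nested4_alt snum
instance (snum : String) (out : Option Int) : Decidable (Spec_find_nested4 snum out) := by unfold Spec_find_nested4; infer_instance

-- ===== CLAIM (what is proved, stated in full; the proofs are below) =====
def Claim_equal_find_nested4 : Prop := ∀ (snum : String), Dom_find_nested4 snum → Spec_find_nested4 snum (find_nested4 snum)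

-- ===== LEMMAS AND PROOFS =====

-- scan c cs = the list of running depths starting at c
def pvScan (c : Int) : List Char → List Int
  | [] => [c]
  | ch :: cs => c :: pvScan (c + find_nested4_delta ch) cs

theorem pvGetLast_concat (ds : List Int) (c : Int) : (ds ++ [c]).getLast! = c := by
  cases ds with
  | nil => rfl
  | cons a as => simp [List.getLast!]

theorem pvDepths_foldl (cs : List Char) (ds : List Int) (c : Int) :
    cs.foldl (fun ds ch => ds ++ [ds.getLast! + find_nested4_delta ch]) (ds ++ [c])
      = ds ++ pvScan c cs := by
  induction cs generalizing ds c with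
  | nil => simp [pvScan]
  | cons ch cs ih =>
    simp only [List.foldl_cons, pvScan]
    rw [pvGetLast_concat, List.append_assoc]
    have := ih (ds ++ [c]) (c + find_nested4_delta ch)
    rw [List.append_assoc] at this
    simpa using this

theorem pvDepths_eq_scan (cs : List Char) :
    find_nested4_depths cs = pvScan 0 cs := by
  have := pvDepths_foldl cs [] 0
  simpa [find_nested4_depths] using this

-- the key invariant: A's running counter equals B's table lookup
theorem pv_main (cs : List Char) (k : Int) (hk : 0 ≤ k) (c : Int) (depths : List Int)
    (h : ∀ j : Nat, j ≤ cs.length → depths.getD (k.toNat + j) 0 = (pvScan c cs).getD j 0) :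
    find_nested4_loop (PySem.List.enumerate cs k) c
      = find_nested4_search depths (PySem.List.enumerate cs k) := by
  induction cs generalizing k c with
  | nil => simp [PySem.List.enumerate_nil, find_nested4_loop, find_nested4_search]
  | cons ch cs ih =>
    rw [PySem.List.enumerate_cons]
    have h0 : depths.getD k.toNat 0 = c := by
      have := h 0 (by simp)
      simpa [pvScan] using this
    simp only [find_nested4_loop, find_nested4_search, h0]
    split
    · rfl
    · have hk1 : (0:Int) ≤ k + 1 := by omega
      apply ih (k + 1) hk1
      intro j hj
      have := h (j + 1) (by simpa using hj)
      have hkn : (k + 1).toNat + j = k.toNat + (j + 1) := by omega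
      rw [hkn, this]
      simp only [pvScan, List.getD]
      · -- charwise case split to show count2 = c + delta ch
        rcases Decidable.em (ch = '[') with h1 | h1
        · simp [h1, find_nested4_delta]
        · rcases Decidable.em (ch = ']') with h2 | h2
          · simp [h2, find_nested4_delta, sub_eq_add_neg]
          · simp [h1, h2, find_nested4_delta]

-- ===== VERDICT (by name: the statement is the Claim_ definition above) =====
theorem find_nested4_spec : Claim_equal_find_nested4 := by
  intro snum _
  unfold Spec_find_nested4 find_nested4 find_nested4_alt
  rw [pvDepths_eq_scan]
  exact pv_main snum.toList 0 le_rfl 0 (pvScan 0 snum.toList) (by intro j hj; simp)
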